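-- pv_equiv track=rewrite | github.com/fwang12345/nonogram-solver | solver.py | pattern_range
-- ===== SOURCE A (Python) =====
-- def pattern_range(size, rows, cols):
--     rows_range = []
--     cols_range = []
--     for row in rows:
--         l = len(row)
--         count = 0
--         lower = [0 for _ in range(l)]
--         for i in range(l):
--             lower[i] = count;
--             count += row[i] + 1
--         count = size
--         upper = [0 for _ in range(l)]
--         for i in range(l-1, -1, -1):
--             count -= row[i] + 1
--             upper[i] = count + 2;
--
--         rows_range.append([(lower[i], upper[i]) for i in range(l)])
--     for col in cols:
--         l = len(col)
--         count = 0
--         lower = [0 for _ in range(l)]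
--         for i in range(l):
--             lower[i] = count;
--             count += col[i] + 1
--         count = size
--         upper = [0 for _ in range(l)]
--         for i in range(l-1, -1, -1):
--             count -= col[i] + 1
--             upper[i] = count + 2;
--
--         cols_range.append([(lower[i], upper[i]) for i in range(l)])
--     return rows_range, cols_range
-- ===== SOURCE B (Python) =====
-- def pattern_range(size, rows, cols):
--     def ranges(clue):
--         slack = size - sum(clue) - len(clue) + 2
--         out = []
--         pos = 0
--         for c in clue:
--             out.append((pos, pos + slack))
--             pos += c + 1
--         return out
--     return [ranges(r) for r in rows], [ranges(c) for c in cols]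
-- ===== Notes on version B (the rewrite author's own statement) =====
-- stated objective: simpler
-- what changed: Replaces A's separate backward suffix-sum loop for upper bounds with the identity upper[i] = lower[i] + (size - sum(clue) - len(clue) + 2), emitting each (lower, upper) pair in a single forward pass per clue via one shared helper.
import Mathlib
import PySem

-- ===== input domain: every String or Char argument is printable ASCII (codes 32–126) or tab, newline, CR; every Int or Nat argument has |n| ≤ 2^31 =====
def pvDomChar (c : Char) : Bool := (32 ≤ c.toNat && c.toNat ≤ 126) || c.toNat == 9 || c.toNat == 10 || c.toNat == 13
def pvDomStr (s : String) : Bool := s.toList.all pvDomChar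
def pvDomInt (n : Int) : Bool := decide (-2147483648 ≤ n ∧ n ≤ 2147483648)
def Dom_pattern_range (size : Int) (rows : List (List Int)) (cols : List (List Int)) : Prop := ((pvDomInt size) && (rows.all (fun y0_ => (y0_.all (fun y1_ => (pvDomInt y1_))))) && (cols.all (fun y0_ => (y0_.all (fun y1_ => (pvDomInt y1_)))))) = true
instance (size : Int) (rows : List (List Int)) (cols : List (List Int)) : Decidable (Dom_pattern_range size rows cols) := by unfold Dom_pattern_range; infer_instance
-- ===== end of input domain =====

-- B removes A's backward suffix-sum loop: upper[i] = lower[i] + (size - sum - len + 2), one forward pass per clue.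


-- ===== PORT A =====
-- forward loop: lower[i] = count; count += row[i] + 1
def aLower : List Int → Int → List Int
  | [], _ => []
  | x :: xs, count => count :: aLower xs (count + (x + 1))

-- backward loop over i = l-1 .. 0: count -= row[i]+1; upper[i] = count + 2
-- (processed right-to-left; returns (upper list, final count))
def aUpper : List Int → Int → List Int × Int
  | [], count => ([], count)
  | x :: xs, count =>
      let r := aUpper xs count
      let c := r.2 - (x + 1)
      ((c + 2) :: r.1, c)

-- [(lower[i], upper[i]) for i in range(l)]
def aRowRange (size : Int) (row : List Int) : List (Int × Int) :=
  (aLower row 0).zip (aUpper row size).1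

def pattern_range (size : Int) (rows : List (List Int)) (cols : List (List Int)) : (List (List (Int × Int))) × (List (List (Int × Int))) :=
  (rows.map (aRowRange size), cols.map (aRowRange size))

-- ===== PORT B =====
def bGo (slack : Int) : List Int → Int → List (Int × Int)
  | [], _ => []
  | c :: cs, pos => (pos, pos + slack) :: bGo slack cs (pos + (c + 1))

def bRanges (size : Int) (clue : List Int) : List (Int × Int) :=
  bGo (size - clue.sum - (clue.length : Int) + 2) clue 0

def pattern_range_alt (size : Int) (rows : List (List Int)) (cols : List (List Int)) : (List (List (Int × Int))) × (List (List (Int × Int))) :=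
  (rows.map (bRanges size), cols.map (bRanges size))

-- ===== PRECONDITION & SPEC =====
def Spec_pattern_range (size : Int) (rows : List (List Int)) (cols : List (List Int)) (out : (List (List (Int × Int))) × (List (List (Int × Int)))) : Prop := out = pattern_range_alt size rows cols
instance (size : Int) (rows : List (List Int)) (cols : List (List Int)) (out : (List (List (Int × Int))) × (List (List (Int × Int)))) : Decidable (Spec_pattern_range size rows cols out) := by unfold Spec_pattern_range; infer_instance

-- ===== CLAIM (what is proved, stated in full; the proofs are below) =====
def Claim_equal_pattern_range : Prop := ∀ (size : Int) (rows : List (List Int)) (cols : List (List Int)), Dom_pattern_range size rows cols → Spec_pattern_range size rows cols (pattern_range size rows cols)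

-- ===== LEMMAS AND PROOFS =====
lemma aUpper_snd (xs : List Int) (s : Int) :
    (aUpper xs s).2 = s - (xs.sum + (xs.length : Int)) := by
  induction xs with
  | nil => simp [aUpper]
  | cons x xs ih => simp [aUpper, ih]; ring

lemma zip_eq_bGo (xs : List Int) (s cnt : Int) :
    (aLower xs cnt).zip (aUpper xs s).1
      = bGo (s - xs.sum - (xs.length : Int) + 2 - cnt) xs cnt := by
  induction xs generalizing cnt with
  | nil => simp [aLower, aUpper, bGo]
  | cons x xs ih =>
    simp only [aLower, aUpper, bGo, List.zip_cons_cons, aUpper_snd, List.cons.injEq]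
    refine ⟨?_, ?_⟩
    · simp only [List.sum_cons, List.length_cons, Prod.mk.injEq, true_and]
      push_cast; ring
    · rw [ih (cnt + (x + 1))]
      congr 1
      simp only [List.sum_cons, List.length_cons]
      push_cast; ring

lemma rowRange_eq (size : Int) (row : List Int) :
    aRowRange size row = bRanges size row := by
  unfold aRowRange bRanges
  rw [zip_eq_bGo]
  congr 1
  ring

-- ===== VERDICT (by name: the statement is the Claim_ definition above) =====
theorem pattern_range_spec : Claim_equal_pattern_range := by
  intro size rows cols _
  unfold Spec_pattern_range pattern_range pattern_range_alt
  simp [funext (rowRange_eq size)]
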